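-- pv_equiv track=rewrite | github.com/Sudarshan-Hegde/Agri-SR-AL-Net | geo-agri-analyst/backend/app/crop_suggestion_service.py | _get_suitable_soil_types
-- ===== SOURCE A (Python) =====
-- from typing import Optional, Dict, Any, List, Tuple
--
-- def _get_suitable_soil_types(primary_type: str) -> List[str]:
--     """Get list of compatible soil types"""
--     soil_families = {
--         "loamy": ["loamy", "fertile", "well-drained", "sandy loam", "clay loam"],
--         "sandy": ["sandy", "sandy loam", "well-drained"],
--         "clay": ["clay", "clay loam", "waterlogged"],
--         "fertile": ["fertile", "loamy", "rich organic", "well-drained"]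
--     }
--
--     for family, types in soil_families.items():
--         if primary_type in types:
--             return types
--
--     return [primary_type, "loamy", "well-drained"]
-- ===== SOURCE B (Python) =====
-- from typing import List
--
-- # Denormalized answer table: each known soil type maps directly to its
-- # compatibility list (the first family containing it in the original data).
-- _LOAMY_FAMILY = ["loamy", "fertile", "well-drained", "sandy loam", "clay loam"]
-- _SANDY_FAMILY = ["sandy", "sandy loam", "well-drained"]
-- _CLAY_FAMILY = ["clay", "clay loam", "waterlogged"]
-- _FERTILE_FAMILY = ["fertile", "loamy", "rich organic", "well-drained"]
--
-- _SOIL_COMPAT = {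
--     "loamy": _LOAMY_FAMILY,
--     "fertile": _LOAMY_FAMILY,
--     "well-drained": _LOAMY_FAMILY,
--     "sandy loam": _LOAMY_FAMILY,
--     "clay loam": _LOAMY_FAMILY,
--     "sandy": _SANDY_FAMILY,
--     "clay": _CLAY_FAMILY,
--     "waterlogged": _CLAY_FAMILY,
--     "rich organic": _FERTILE_FAMILY,
-- }
--
-- def _get_suitable_soil_types(primary_type: str) -> List[str]:
--     """Get list of compatible soil types"""
--     return _SOIL_COMPAT.get(primary_type, [primary_type, "loamy", "well-drained"])
-- ===== Notes on version B (the rewrite author's own statement) =====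
-- stated objective: simpler
-- what changed: Replaces the families structure and the scan-with-membership-test loop by a hand-flattened literal answer table (type -> compatibility list, overlaps resolved at write time to the first family) and a single dict.get with the fallback as default; there is no loop at all.
import Mathlib
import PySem

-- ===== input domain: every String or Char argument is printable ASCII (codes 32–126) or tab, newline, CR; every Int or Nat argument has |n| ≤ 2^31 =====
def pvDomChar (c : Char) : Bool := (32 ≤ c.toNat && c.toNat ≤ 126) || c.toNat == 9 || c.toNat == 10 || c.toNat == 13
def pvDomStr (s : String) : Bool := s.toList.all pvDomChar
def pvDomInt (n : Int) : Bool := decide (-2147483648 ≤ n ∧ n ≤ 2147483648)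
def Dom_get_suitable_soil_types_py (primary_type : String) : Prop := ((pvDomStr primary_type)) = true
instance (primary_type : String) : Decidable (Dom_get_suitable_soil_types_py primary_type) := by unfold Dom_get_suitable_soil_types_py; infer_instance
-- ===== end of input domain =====

-- B replaces A's scan over soil families by a hand-flattened literal answer table
-- (type -> compatibility list) and a single lookup with the fallback as default (simpler).


-- ===== PORT A =====
-- A's dict literal of families
def pvSoilFamilies : List (String × List String) :=
  [("loamy", ["loamy", "fertile", "well-drained", "sandy loam", "clay loam"]),
   ("sandy", ["sandy", "sandy loam", "well-drained"]),
   ("clay", ["clay", "clay loam", "waterlogged"]),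
   ("fertile", ["fertile", "loamy", "rich organic", "well-drained"])]

-- A's for-loop with early return: first family whose types list contains primary_type
def pvScanA (primary_type : String) : List (String × List String) → List String
  | [] => [primary_type, "loamy", "well-drained"]
  | (_, types) :: rest =>
      if types.contains primary_type then types else pvScanA primary_type rest

def get_suitable_soil_types_py (primary_type : String) : List String :=
  pvScanA primary_type pvSoilFamilies

-- ===== PORT B =====
-- B's hand-flattened literal answer table (module-level constants in Source B)
def pvLoamyFamily : List String := ["loamy", "fertile", "well-drained", "sandy loam", "clay loam"]
def pvSandyFamily : List String := ["sandy", "sandy loam", "well-drained"]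
def pvClayFamily : List String := ["clay", "clay loam", "waterlogged"]
def pvFertileFamily : List String := ["fertile", "loamy", "rich organic", "well-drained"]

def pvSoilCompat : PySem.Dict String (List String) := PySem.Dict.mk
  [("loamy", pvLoamyFamily), ("fertile", pvLoamyFamily), ("well-drained", pvLoamyFamily),
   ("sandy loam", pvLoamyFamily), ("clay loam", pvLoamyFamily), ("sandy", pvSandyFamily),
   ("clay", pvClayFamily), ("waterlogged", pvClayFamily), ("rich organic", pvFertileFamily)]

def get_suitable_soil_types_py_alt (primary_type : String) : List String :=
  (pvSoilCompat.get? primary_type).getD [primary_type, "loamy", "well-drained"]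

-- ===== PRECONDITION & SPEC =====
def Spec_get_suitable_soil_types_py (primary_type : String) (out : List String) : Prop := out = get_suitable_soil_types_py_alt primary_type
instance (primary_type : String) (out : List String) : Decidable (Spec_get_suitable_soil_types_py primary_type out) := by unfold Spec_get_suitable_soil_types_py; infer_instance

-- ===== CLAIM =====
def Claim_equal_get_suitable_soil_types_py : Prop := ∀ (primary_type : String), Dom_get_suitable_soil_types_py primary_type → Spec_get_suitable_soil_types_py primary_type (get_suitable_soil_types_py primary_type)

-- ===== LEMMAS AND PROOFS =====

-- ===== VERDICT =====
theorem get_suitable_soil_types_py_spec : Claim_equal_get_suitable_soil_types_py := by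
  intro pt _
  unfold Spec_get_suitable_soil_types_py get_suitable_soil_types_py get_suitable_soil_types_py_alt
  by_cases h1 : pt = "loamy"
  · subst h1; decide
  by_cases h2 : pt = "fertile"
  · subst h2; decide
  by_cases h3 : pt = "well-drained"
  · subst h3; decide
  by_cases h4 : pt = "sandy loam"
  · subst h4; decide
  by_cases h5 : pt = "clay loam"
  · subst h5; decide
  by_cases h6 : pt = "sandy"
  · subst h6; decide
  by_cases h7 : pt = "clay"
  · subst h7; decide
  by_cases h8 : pt = "waterlogged"
  · subst h8; decide
  by_cases h9 : pt = "rich organic"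
  · subst h9; decide
  · have h1' := Ne.symm h1; have h2' := Ne.symm h2; have h3' := Ne.symm h3
    have h4' := Ne.symm h4; have h5' := Ne.symm h5; have h6' := Ne.symm h6
    have h7' := Ne.symm h7; have h8' := Ne.symm h8; have h9' := Ne.symm h9
    simp only [pvScanA, pvSoilFamilies, pvSoilCompat,
      PySem.Dict.get?_mk_cons, List.contains_cons, List.contains_nil]
    simp [PySem.Dict.get?, h1', h2', h3', h4', h5', h6', h7', h8', h9',
          h1, h2, h3, h4, h5, h6, h7, h8, h9]
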